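-- pv_equiv track=rewrite | github.com/mnuman/advent-of-code | 2023/solutions/day09.py | reduce_and_extend
-- ===== SOURCE A (Python) =====
-- from typing import Generator, Any
--
-- def line_diffs(lst: list[int]) -> list[int]:
--     return [lst[i+1] - lst[i] for i in range(len(lst) - 1)]
--
-- def generate_from_diffs(start: int, seq: list[int]) -> Generator[int, Any, None]:
--     s = start
--     seq.reverse()
--     yield s
--     while len(seq) > 0:
--         s += seq.pop()
--         yield s
--
-- def reduce_and_extend(lst: list[int]) -> int:
--     start: list[int] = []
--     curr = lst.copy()
--
--     while sum(curr) != 0: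
--         start.append(curr[0])
--         curr = line_diffs(curr)
--     curr.append(0)
--
--     while len(start) > 0:
--         prev: list[int] = [x for x in generate_from_diffs(start.pop(), curr)]
--         curr: list[int] = prev
--     return curr[-1]
-- ===== SOURCE B (Python) =====
-- def line_diffs(lst: list[int]) -> list[int]:
--     return [b - a for a, b in zip(lst, lst[1:])]
--
-- def reduce_and_extend(lst: list[int]) -> int:
--     total = 0
--     curr = lst.copy()
--     while sum(curr) != 0:
--         total += curr[-1]
--         curr = line_diffs(curr)
--     return total
-- ===== Notes on version B (the rewrite author's own statement) =====
-- stated objective: simpler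
-- what changed: B drops A's whole second phase (the generator that rebuilds every level upward from collected first elements): it accumulates the last element of each level in the single difference loop, since the extrapolated value is exactly the sum of the visited levels' last elements.
import Mathlib
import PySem

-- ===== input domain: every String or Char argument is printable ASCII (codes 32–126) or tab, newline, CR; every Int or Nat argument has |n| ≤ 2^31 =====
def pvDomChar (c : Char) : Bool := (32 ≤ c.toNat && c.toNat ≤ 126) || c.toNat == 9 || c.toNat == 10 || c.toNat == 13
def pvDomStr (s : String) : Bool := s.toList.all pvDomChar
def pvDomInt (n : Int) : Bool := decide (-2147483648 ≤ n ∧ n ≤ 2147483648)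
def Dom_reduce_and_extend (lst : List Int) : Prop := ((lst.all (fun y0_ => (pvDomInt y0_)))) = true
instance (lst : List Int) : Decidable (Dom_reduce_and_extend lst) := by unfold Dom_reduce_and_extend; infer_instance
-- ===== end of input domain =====

-- B replaces A's upward generator-based reconstruction phase by summing the last
-- element of each difference level inside the single difference loop (simpler; same
-- `sum(curr) != 0` termination behaviour).

-- a list with nonzero sum is nonempty (used for termination of the loops)
theorem pvSumNeNil {l : List Int} (h : l.sum ≠ 0) : 0 < l.length := by
  cases l <;> simp_all

-- ===== PORT A =====
-- line_diffs: [lst[i+1] - lst[i] for i in range(len(lst) - 1)]; indices are always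
-- in range, so pyGetD's default is never used.
def pyLineDiffs (l : List Int) : List Int :=
  (PySem.List.pyRange 0 ((l.length : Int) - 1) 1).map
    (fun i => PySem.List.pyGetD l (i + 1) 0 - PySem.List.pyGetD l i 0)

theorem pyLineDiffs_length (l : List Int) : (pyLineDiffs l).length = l.length - 1 := by
  simp [pyLineDiffs, PySem.List.length_pyRange_one]

-- first while loop: collect curr[0] into start, replace curr by its diffs
def loopA1 (curr start : List Int) : List Int × List Int :=
  if h : curr.sum ≠ 0 then
    loopA1 (pyLineDiffs curr) (start ++ [PySem.List.pyGetD curr 0 0])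
  else (start, curr)
termination_by curr.length
decreasing_by
  have := pvSumNeNil h
  rw [pyLineDiffs_length]; omega

-- generate_from_diffs collected to a list: seq.reverse then pop() consumes seq in
-- original order, yielding the running sums starting at s
def genFromDiffs : Int → List Int → List Int
  | s, [] => [s]
  | s, x :: rest => s :: genFromDiffs (s + x) rest

-- second while loop: start.pop() pops the LAST element
def loopA2 (start curr : List Int) : List Int :=
  if h : start ≠ [] then
    loopA2 start.dropLast (genFromDiffs (start.getLast h) curr)
  else curr
termination_by start.length
decreasing_by
  have := List.length_pos_iff.mpr h
  simp [List.length_dropLast]; omega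

-- curr is always nonempty at the final indexing, so pyGetD's default is never used
def reduce_and_extend (lst : List Int) : Int :=
  PySem.List.pyGetD (loopA2 (loopA1 lst []).1 ((loopA1 lst []).2 ++ [0])) (-1) 0

-- ===== PORT B =====
-- line_diffs: [b - a for a, b in zip(lst, lst[1:])]
def lineDiffsAlt (l : List Int) : List Int :=
  List.zipWith (fun a b => b - a) l (l.drop 1)

theorem lineDiffsAlt_length (l : List Int) : (lineDiffsAlt l).length = l.length - 1 := by
  simp [lineDiffsAlt]

-- total += curr[-1]; curr = line_diffs(curr)  while sum(curr) != 0
def loopB (curr : List Int) (total : Int) : Int :=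
  if h : curr.sum ≠ 0 then
    loopB (lineDiffsAlt curr) (total + PySem.List.pyGetD curr (-1) 0)
  else total
termination_by curr.length
decreasing_by
  have := pvSumNeNil h
  rw [lineDiffsAlt_length]; omega

def reduce_and_extend_alt (lst : List Int) : Int :=
  loopB lst 0

-- ===== PRECONDITION & SPEC =====
def Spec_reduce_and_extend (lst : List Int) (out : Int) : Prop := out = reduce_and_extend_alt lst
instance (lst : List Int) (out : Int) : Decidable (Spec_reduce_and_extend lst out) := by unfold Spec_reduce_and_extend; infer_instance

-- ===== CLAIM (what is proved, stated in full; the proofs are below) =====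
def Claim_equal_reduce_and_extend : Prop := ∀ (lst : List Int), Dom_reduce_and_extend lst → Spec_reduce_and_extend lst (reduce_and_extend lst)

-- ===== LEMMAS AND PROOFS =====

-- the two line_diffs helpers agree
theorem diffs_eq (l : List Int) : pyLineDiffs l = lineDiffsAlt l := by
  apply List.ext_getElem
  · rw [pyLineDiffs_length, lineDiffsAlt_length]
  · intro k h1 h2
    have hk : k < l.length - 1 := by rw [pyLineDiffs_length] at h1; exact h1
    simp [pyLineDiffs, lineDiffsAlt, PySem.List.getElem_pyRange_one]
    have e1 : ((k : Int) + 1) = ((k + 1 : Nat) : Int) := by push_cast; ring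
    rw [e1, PySem.List.pyGetD_natCast, List.getD_eq_getElem l 0 (by omega),
        List.getElem?_eq_getElem (by omega)]
    simp

-- loopB is linear in its accumulator
theorem loopB_shift : ∀ n (curr : List Int), curr.length ≤ n → ∀ t, loopB curr t = t + loopB curr 0 := by
  intro n
  induction n with
  | zero =>
    intro curr hlen t
    have hnil : curr = [] := by cases curr <;> simp_all
    subst hnil
    simp [loopB]
  | succ m ih =>
    intro curr hlen t
    rw [loopB]
    conv_rhs => rw [loopB]
    by_cases h : curr.sum ≠ 0
    · rw [dif_pos h, dif_pos h]
      have hl : (lineDiffsAlt curr).length ≤ m := by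
        have := pvSumNeNil h
        rw [lineDiffsAlt_length]; omega
      rw [ih _ hl, ih _ hl (0 + _)]
      ring
    · rw [dif_neg h, dif_neg h]; simp

-- reconstruction of a level from its head and (extended) diffs
theorem gen_reconstruct : ∀ (rest : List Int) (x t : Int),
    genFromDiffs x (lineDiffsAlt (x :: rest) ++ [t])
      = (x :: rest) ++ [(x :: rest).getLast (by simp) + t] := by
  intro rest
  induction rest with
  | nil => intro x t; simp [lineDiffsAlt, genFromDiffs]
  | cons y r ih =>
    intro x t
    have hd : lineDiffsAlt (x :: y :: r) = (y - x) :: lineDiffsAlt (y :: r) := by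
      simp [lineDiffsAlt]
    rw [hd]
    show x :: genFromDiffs (x + (y - x)) (lineDiffsAlt (y :: r) ++ [t]) = _
    have e : x + (y - x) = y := by ring
    rw [e, ih y t]
    simp [List.getLast]

-- main invariant: running A's second phase on loop1's output is the same as
-- appending B's answer to the current level
theorem main_inv : ∀ n (curr : List Int), curr.length ≤ n → ∀ start,
    loopA2 (loopA1 curr start).1 ((loopA1 curr start).2 ++ [0])
      = loopA2 start (curr ++ [loopB curr 0]) := by
  intro n
  induction n with
  | zero =>
    intro curr hlen start
    have hnil : curr = [] := by cases curr <;> simp_all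
    subst hnil
    simp [loopA1, loopB]
  | succ m ih =>
    intro curr hlen start
    rw [loopA1]
    conv_rhs => rw [loopB]
    by_cases h : curr.sum ≠ 0
    · rw [dif_pos h, dif_pos h]
      have hpos := pvSumNeNil h
      have hl : (pyLineDiffs curr).length ≤ m := by rw [pyLineDiffs_length]; omega
      rw [ih _ hl]
      obtain ⟨x, rest, rfl⟩ : ∃ x rest, curr = x :: rest := by
        cases curr with
        | nil => simp at hpos
        | cons a b => exact ⟨a, b, rfl⟩
      -- unfold one step of loopA2 on the nonempty start ++ [head]
      rw [loopA2]
      simp only [List.getLast_append_singleton, List.dropLast_concat]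
      rw [PySem.List.pyGetD_zero_cons, diffs_eq, gen_reconstruct,
          PySem.List.pyGetD_neg_one (xs := x :: rest) (d := 0) (h := List.cons_ne_nil x rest)]
      conv_rhs => rw [loopB_shift (lineDiffsAlt (x :: rest)).length _ le_rfl]
      simp
    · rw [dif_neg h, dif_neg h]

theorem loopA2_nil (curr : List Int) : loopA2 [] curr = curr := by
  rw [loopA2]; simp

-- ===== VERDICT (by name: the statement is the Claim_ definition above) =====
theorem reduce_and_extend_spec : Claim_equal_reduce_and_extend := by
  unfold Claim_equal_reduce_and_extend
  intro lst _
  unfold Spec_reduce_and_extend reduce_and_extend reduce_and_extend_alt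
  rw [main_inv lst.length lst le_rfl [], loopA2_nil,
      PySem.List.pyGetD_neg_one_append_singleton]
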